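-- pv_equiv track=rewrite | github.com/amstocker/aoc2021 | day14/day14.py | iterate_pair_counts
-- ===== SOURCE A (Python) =====
-- def pair_to_index(pair):
--     return (26 * (ord(pair[0]) - 65)) + (ord(pair[1]) - 65)
--
-- def index_to_pair(i):
--     return chr(i // 26 + 65) + chr(i % 26 + 65)
--
-- def iterate_pair_counts(counts, rules, n=1):
--     if n <= 0:
--         return counts
--     new_counts = (26 * 26) * [0]
--     for i in range(26 * 26):
--         pair = index_to_pair(i)
--         if not pair in rules:
--             continue
--         new_counts[pair_to_index(pair[0] + rules[pair])] += counts[i]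
--         new_counts[pair_to_index(rules[pair] + pair[1])] += counts[i]
--     return iterate_pair_counts(new_counts, rules, n - 1)
-- ===== SOURCE B (Python) =====
-- def pair_to_index(pair):
--     return (26 * (ord(pair[0]) - 65)) + (ord(pair[1]) - 65)
--
-- def index_to_pair(i):
--     return chr(i // 26 + 65) + chr(i % 26 + 65)
--
-- def iterate_pair_counts(counts, rules, n=1):
--     if n <= 0:
--         return counts
--     trans = []
--     for i in range(676):
--         pair = index_to_pair(i)
--         if pair in rules:
--             c = rules[pair]
--             trans.append((i, pair_to_index(pair[0] + c), pair_to_index(c + pair[1])))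
--     for _ in range(n):
--         new_counts = 676 * [0]
--         for i, j, k in trans:
--             new_counts[j] += counts[i]
--             new_counts[k] += counts[i]
--         counts = new_counts
--     return counts
-- ===== Notes on version B (the rewrite author's own statement) =====
-- stated objective: alternative
-- what changed: B compiles the rules once into an integer transition table (source index, two successor indices) and then runs n iterative passes of pure integer adds, hoisting A's per-step 676 pair-string constructions and dict lookups out of the loop and flattening the tail recursion; Pre_ keeps n <= 900 (A recurses once per step and CPython raises RecursionError near depth 1000) and excludes inputs where A raises IndexError (matched rule with empty value, write index outside [-676, 676), or key index past len(counts)).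
import Mathlib
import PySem

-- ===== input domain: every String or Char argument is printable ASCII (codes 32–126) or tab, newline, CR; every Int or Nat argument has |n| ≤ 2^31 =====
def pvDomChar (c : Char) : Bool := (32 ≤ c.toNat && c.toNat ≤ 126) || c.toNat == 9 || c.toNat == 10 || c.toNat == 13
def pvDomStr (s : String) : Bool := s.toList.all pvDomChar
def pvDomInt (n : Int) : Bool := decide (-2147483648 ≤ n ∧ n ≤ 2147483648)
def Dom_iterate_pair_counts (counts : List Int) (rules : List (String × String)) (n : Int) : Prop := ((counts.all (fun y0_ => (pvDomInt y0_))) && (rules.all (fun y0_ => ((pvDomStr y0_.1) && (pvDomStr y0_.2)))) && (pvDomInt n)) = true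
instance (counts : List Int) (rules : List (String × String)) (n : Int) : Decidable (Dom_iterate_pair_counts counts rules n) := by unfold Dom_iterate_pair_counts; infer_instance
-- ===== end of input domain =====

-- B compiles the rules once into an integer transition table and iterates n passes of integer
-- adds, replacing A's tail recursion that redoes the 676 pair-string constructions and dict
-- lookups every step; the equivalence is about the return value (neither program mutates its
-- arguments).

-- ===== PORT A =====
-- ord(s[0]), ord(s[1]) of a pair string; `.getD 'A'` stands at the sites where Python would
-- raise IndexError on a too-short string — excluded by Pre_ (the empty-value case).
def pair_to_index (pair : String) : Int :=
  26 * ((((PySem.Str.pyGet? pair 0).getD 'A').toNat : Int) - 65)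
    + ((((PySem.Str.pyGet? pair 1).getD 'A').toNat : Int) - 65)

-- chr(i // 26 + 65) + chr(i % 26 + 65); exact at every call site (0 ≤ i < 676)
def index_to_pair (i : Int) : String :=
  String.ofList [Char.ofNat (PySem.Int.floordiv i 26 + 65).toNat,
                 Char.ofNat (PySem.Int.mod i 26 + 65).toNat]

-- new_counts[j] += w on the 676-long list: exact for -676 ≤ j < 676 (Python wraps a negative
-- index); outside that band Python raises IndexError — excluded by Pre_
def pvAddAt (nc : List Int) (j w : Int) : List Int :=
  if 0 ≤ j then nc.modify j.toNat (· + w)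
  else nc.modify ((nc.length : Int) + j).toNat (· + w)

-- the body of A's `for i in range(26*26)` loop building new_counts; `pyGetD counts i 0` stands
-- at the counts[i] IndexError site, excluded by Pre_ (key index within len(counts))
def pvStepA (counts : List Int) (rules : List (String × String)) : List Int :=
  (PySem.List.pyRange 0 (26 * 26) 1).foldl (fun nc i =>
    let pair := index_to_pair i
    match (PySem.Dict.mk rules).get? pair with
    | none => nc
    | some v =>
      let nc := pvAddAt nc
        (pair_to_index (String.ofList ([(PySem.Str.pyGet? pair 0).getD 'A'] ++ v.toList)))
        (PySem.List.pyGetD counts i 0)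
      pvAddAt nc
        (pair_to_index (String.ofList (v.toList ++ [(PySem.Str.pyGet? pair 1).getD 'A'])))
        (PySem.List.pyGetD counts i 0))
    (List.replicate (26 * 26) (0 : Int))

def iterate_pair_counts (counts : List Int) (rules : List (String × String)) (n : Int) : List Int :=
  if n ≤ 0 then counts
  else iterate_pair_counts (pvStepA counts rules) rules (n - 1)
termination_by n.toNat
decreasing_by omega

-- ===== PORT B =====
-- B's first loop: trans.append((i, pair_to_index(pair[0] + c), pair_to_index(c + pair[1])))
-- for each of the 676 pairs present in rules
def pvTrans (rules : List (String × String)) : List (Int × Int × Int) :=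
  (PySem.List.pyRange 0 676 1).foldl (fun trans i =>
    let pair := index_to_pair i
    match (PySem.Dict.mk rules).get? pair with
    | none => trans
    | some c => trans ++
        [(i, pair_to_index (String.ofList ([(PySem.Str.pyGet? pair 0).getD 'A'] ++ c.toList)),
             pair_to_index (String.ofList (c.toList ++ [(PySem.Str.pyGet? pair 1).getD 'A'])))])
    []

-- B's inner loop: `for i, j, k in trans: new_counts[j] += counts[i]; new_counts[k] += counts[i]`
def pvStepB (trans : List (Int × Int × Int)) (counts : List Int) : List Int :=
  trans.foldl (fun nc t =>
    pvAddAt (pvAddAt nc t.2.1 (PySem.List.pyGetD counts t.1 0))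
      t.2.2 (PySem.List.pyGetD counts t.1 0))
    (List.replicate 676 (0 : Int))

-- early return, then `for _ in range(n): counts = step(counts)`, `return counts`
def iterate_pair_counts_alt (counts : List Int) (rules : List (String × String)) (n : Int) : List Int :=
  if n ≤ 0 then counts
  else
    let trans := pvTrans rules
    (List.range n.toNat).foldl (fun cs _ => pvStepB trans cs) counts

-- ===== PRECONDITION & SPEC =====
def pvKeyOK (s : String) : Bool :=
  match s.toList with
  | [a, b] => 'A' ≤ a && a ≤ 'Z' && 'A' ≤ b && b ≤ 'Z'
  | _ => false

def pvKeyIdx (s : String) : Int :=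
  match s.toList with
  | a :: b :: _ => 26 * ((a.toNat : Int) - 65) + ((b.toNat : Int) - 65)
  | _ => 0

-- the two write indices a matched rule (key, value) produces: (key0,value0) and the first two
-- characters of value ++ key-second-char
def pvJs (p : String × String) : Int × Int :=
  match p.1.toList, p.2.toList with
  | [a, b], c :: rest =>
      (26 * ((a.toNat : Int) - 65) + ((c.toNat : Int) - 65),
       26 * ((c.toNat : Int) - 65) + (((rest.headD b).toNat : Int) - 65))
  | _, _ => (0, 0)

-- Pre_ keeps n ≤ 900 (A recurses once per step; CPython raises RecursionError near depth 1000 —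
-- in the narrow returning band above 900 both programs return the same value) and excludes the
-- inputs where A raises IndexError when a step runs: a rule matched by the scan (uppercase-pair
-- key) whose value is empty, whose write indices leave the wrap band [-676, 676), or whose key
-- indexes past len(counts).
def Pre_iterate_pair_counts (counts : List Int) (rules : List (String × String)) (n : Int) : Prop :=
  n ≤ 0 ∨ (n ≤ 900 ∧
    ∀ p ∈ rules, pvKeyOK p.1 = true →
      (p.2 ≠ "" ∧ pvKeyIdx p.1 < (counts.length : Int) ∧
       -676 ≤ (pvJs p).1 ∧ (pvJs p).1 < 676 ∧ -676 ≤ (pvJs p).2 ∧ (pvJs p).2 < 676))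
instance (counts : List Int) (rules : List (String × String)) (n : Int) : Decidable (Pre_iterate_pair_counts counts rules n) := by unfold Pre_iterate_pair_counts; infer_instance

def pvWitness_iterate_pair_counts : List Int × (List (String × String)) × Int := ([5], [("AA", "B")], 1)

def Spec_iterate_pair_counts (counts : List Int) (rules : List (String × String)) (n : Int) (out : List Int) : Prop := out = iterate_pair_counts_alt counts rules n
instance (counts : List Int) (rules : List (String × String)) (n : Int) (out : List Int) : Decidable (Spec_iterate_pair_counts counts rules n out) := by unfold Spec_iterate_pair_counts; infer_instance

-- ===== CLAIM (what is proved, stated in full; the proofs are below) =====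
def Claim_equal_iterate_pair_counts : Prop := ∀ (counts : List Int) (rules : List (String × String)) (n : Int), Dom_iterate_pair_counts counts rules n → Pre_iterate_pair_counts counts rules n → Spec_iterate_pair_counts counts rules n (iterate_pair_counts counts rules n)

-- ===== LEMMAS AND PROOFS =====

theorem pvWitness_ok :
    Dom_iterate_pair_counts pvWitness_iterate_pair_counts.1 pvWitness_iterate_pair_counts.2.1
      pvWitness_iterate_pair_counts.2.2 ∧
    Pre_iterate_pair_counts pvWitness_iterate_pair_counts.1 pvWitness_iterate_pair_counts.2.1
      pvWitness_iterate_pair_counts.2.2 := by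
  exact ⟨by decide, by decide⟩

-- proof-internal: the transition triple A's scan at index i ends up applying, if any
def pvHf (rules : List (String × String)) (i : Int) : Option (Int × Int × Int) :=
  ((PySem.Dict.mk rules).get? (index_to_pair i)).map (fun c =>
    (i, pair_to_index (String.ofList ([(PySem.Str.pyGet? (index_to_pair i) 0).getD 'A'] ++ c.toList)),
        pair_to_index (String.ofList (c.toList ++ [(PySem.Str.pyGet? (index_to_pair i) 1).getD 'A']))))

-- proof-internal: B's inner-loop body as a named function
def pvApplyT (counts nc : List Int) (t : Int × Int × Int) : List Int :=
  pvAddAt (pvAddAt nc t.2.1 (PySem.List.pyGetD counts t.1 0))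
    t.2.2 (PySem.List.pyGetD counts t.1 0)

theorem transBody_eq (rules : List (String × String)) (acc : List (Int × Int × Int)) (i : Int) :
    (let pair := index_to_pair i
     match (PySem.Dict.mk rules).get? pair with
     | none => acc
     | some c => acc ++
         [(i, pair_to_index (String.ofList ([(PySem.Str.pyGet? pair 0).getD 'A'] ++ c.toList)),
              pair_to_index (String.ofList (c.toList ++ [(PySem.Str.pyGet? pair 1).getD 'A'])))])
      = match pvHf rules i with
        | none => acc
        | some t => acc ++ [t] := by
  unfold pvHf
  cases hg : (PySem.Dict.mk rules).get? (index_to_pair i) with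
  | none => simp [hg]
  | some c => simp [hg]

theorem trans_filterMap (rules : List (String × String)) :
    ∀ (l : List Int) (acc : List (Int × Int × Int)),
      l.foldl (fun trans i =>
        let pair := index_to_pair i
        match (PySem.Dict.mk rules).get? pair with
        | none => trans
        | some c => trans ++
            [(i, pair_to_index (String.ofList ([(PySem.Str.pyGet? pair 0).getD 'A'] ++ c.toList)),
                 pair_to_index (String.ofList (c.toList ++ [(PySem.Str.pyGet? pair 1).getD 'A'])))]) acc
        = acc ++ l.filterMap (pvHf rules) := by
  intro l
  induction l with
  | nil => intro acc; simp
  | cons i t ih =>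
    intro acc
    rw [List.foldl_cons, List.filterMap_cons, transBody_eq rules acc i]
    cases hf : pvHf rules i with
    | none => simpa using ih acc
    | some p => rw [ih (acc ++ [p])]; simp

-- A's loop body at i is B's body applied to the compiled triple at i (or the identity)
theorem bodyA_eq (counts : List Int) (rules : List (String × String)) (nc : List Int) (i : Int) :
    (let pair := index_to_pair i
     match (PySem.Dict.mk rules).get? pair with
     | none => nc
     | some v =>
       let nc := pvAddAt nc
         (pair_to_index (String.ofList ([(PySem.Str.pyGet? pair 0).getD 'A'] ++ v.toList)))
         (PySem.List.pyGetD counts i 0)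
       pvAddAt nc
         (pair_to_index (String.ofList (v.toList ++ [(PySem.Str.pyGet? pair 1).getD 'A'])))
         (PySem.List.pyGetD counts i 0))
      = match pvHf rules i with
        | none => nc
        | some t => pvApplyT counts nc t := by
  unfold pvHf
  cases hg : (PySem.Dict.mk rules).get? (index_to_pair i) with
  | none => simp [hg]
  | some v => simp [hg, pvApplyT]

theorem foldA_eq (counts : List Int) (rules : List (String × String)) :
    ∀ (l : List Int) (nc : List Int),
      l.foldl (fun nc i =>
        let pair := index_to_pair i
        match (PySem.Dict.mk rules).get? pair with
        | none => nc
        | some v =>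
          let nc := pvAddAt nc
            (pair_to_index (String.ofList ([(PySem.Str.pyGet? pair 0).getD 'A'] ++ v.toList)))
            (PySem.List.pyGetD counts i 0)
          pvAddAt nc
            (pair_to_index (String.ofList (v.toList ++ [(PySem.Str.pyGet? pair 1).getD 'A'])))
            (PySem.List.pyGetD counts i 0)) nc
        = (l.filterMap (pvHf rules)).foldl (pvApplyT counts) nc := by
  intro l
  induction l with
  | nil => intro nc; rfl
  | cons i t ih =>
    intro nc
    rw [List.foldl_cons, List.filterMap_cons, bodyA_eq counts rules nc i]
    cases hf : pvHf rules i with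
    | none => simpa using ih nc
    | some p => simpa using ih (pvApplyT counts nc p)

-- one step of A equals one B pass over the compiled transition table
theorem step_eq (counts : List Int) (rules : List (String × String)) :
    pvStepA counts rules = pvStepB (pvTrans rules) counts := by
  unfold pvStepA pvStepB pvTrans
  rw [trans_filterMap rules _ [], List.nil_append, foldA_eq]
  have h676 : PySem.List.pyRange 0 (26 * 26) 1 = PySem.List.pyRange 0 676 1 := by norm_num
  rw [h676]
  rfl

-- a fold that ignores the list's elements is a function iterate
theorem foldl_ignore_iterate {α β : Type} (g : β → β) (l : List α) (c : β) :
    l.foldl (fun s _ => g s) c = g^[l.length] c := by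
  induction l generalizing c with
  | nil => rfl
  | cons x xs ih => simp [List.foldl_cons, ih, Function.iterate_succ_apply]

theorem a_iterate (rules : List (String × String)) :
    ∀ (k : Nat) (n : Int) (c : List Int), n.toNat = k →
      iterate_pair_counts c rules n = (fun cs => pvStepB (pvTrans rules) cs)^[k] c := by
  intro k
  induction k with
  | zero =>
    intro n c h
    have hn : n ≤ 0 := by omega
    simp [iterate_pair_counts, hn]
  | succ k ih =>
    intro n c h
    have hn : ¬ n ≤ 0 := by omega
    rw [iterate_pair_counts, if_neg hn, ih (n - 1) _ (by omega), step_eq,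
      ← Function.iterate_succ_apply]

-- ===== VERDICT =====
theorem iterate_pair_counts_spec : Claim_equal_iterate_pair_counts := by
  intro counts rules n _ _
  unfold Spec_iterate_pair_counts iterate_pair_counts_alt
  by_cases hn : n ≤ 0
  · rw [if_pos hn, iterate_pair_counts, if_pos hn]
  · rw [if_neg hn, foldl_ignore_iterate, List.length_range,
      a_iterate rules n.toNat n counts rfl]
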